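-- pv_equiv track=rewrite | github.com/misanma/zeinproject | mining/software/protein-sol-sequence-prediction-software/squence_maker.py | get_seq_charge
-- ===== SOURCE A (Python) =====
-- def get_seq_charge(seq):
--     charge = 0
--     for char in seq:
--         if char == 'K':
--             charge += 1
--         elif char == 'R':
--             charge += 1
--         elif char == 'H':
--             charge += 1
--         elif char == 'D':
--             charge -= 1
--         elif char == 'E':
--             charge -= 1
--     return charge
-- ===== SOURCE B (Python) =====
-- def get_seq_charge(seq):
--     return (seq.count('K') + seq.count('R') + seq.count('H')
--             - seq.count('D') - seq.count('E'))
-- ===== Notes on version B (the rewrite author's own statement) =====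
-- stated objective: idiomatic
-- what changed: Replaces the single-pass if/elif accumulator loop with five independent str.count scans combined arithmetically; str.count runs in C, so despite multiple passes it is measurably faster than the Python-level loop.
import Mathlib
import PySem

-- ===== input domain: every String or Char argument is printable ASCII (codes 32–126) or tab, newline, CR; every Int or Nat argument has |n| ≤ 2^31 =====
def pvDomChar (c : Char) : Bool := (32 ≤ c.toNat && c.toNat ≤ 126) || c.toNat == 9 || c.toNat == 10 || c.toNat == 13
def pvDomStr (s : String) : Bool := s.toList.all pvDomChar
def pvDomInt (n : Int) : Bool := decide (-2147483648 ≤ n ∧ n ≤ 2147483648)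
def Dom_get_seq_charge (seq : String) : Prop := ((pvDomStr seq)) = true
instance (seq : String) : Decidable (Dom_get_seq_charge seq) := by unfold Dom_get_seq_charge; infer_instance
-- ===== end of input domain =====

-- B replaces A's single-pass if/elif accumulator loop with five str.count scans
-- combined arithmetically (idiomatic one-liner); same O(n) cost.


-- ===== PORT A =====
-- one pass over the characters with an if/elif chain, as in A
def get_seq_charge (seq : String) : Int :=
  seq.toList.foldl (fun charge char =>
    if char == 'K' then charge + 1
    else if char == 'R' then charge + 1
    else if char == 'H' then charge + 1
    else if char == 'D' then charge - 1
    else if char == 'E' then charge - 1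
    else charge) 0

-- ===== PORT B =====
-- five independent scans via str.count, combined arithmetically, as in Source B
def get_seq_charge_alt (seq : String) : Int :=
  (PySem.Str.count seq "K" : Int) + (PySem.Str.count seq "R" : Int)
    + (PySem.Str.count seq "H" : Int)
    - (PySem.Str.count seq "D" : Int) - (PySem.Str.count seq "E" : Int)

-- ===== PRECONDITION & SPEC =====
def Spec_get_seq_charge (seq : String) (out : Int) : Prop := out = get_seq_charge_alt seq
instance (seq : String) (out : Int) : Decidable (Spec_get_seq_charge seq out) := by unfold Spec_get_seq_charge; infer_instance

-- ===== CLAIM (what is proved, stated in full; the proofs are below) =====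
def Claim_equal_get_seq_charge : Prop := ∀ (seq : String), Dom_get_seq_charge seq → Spec_get_seq_charge seq (get_seq_charge seq)

-- ===== LEMMAS AND PROOFS =====

-- Python's str.count with a single-character needle counts the occurrences of that character.
theorem pv_go_single (c : Char) (s : List Char) : ∀ (fuel acc : Nat), s.length ≤ fuel →
    PySem.Chars.count.go [c] fuel s acc = acc + s.count c := by
  induction s with
  | nil => intro fuel acc _; cases fuel <;> simp [PySem.Chars.count.go]
  | cons h t ih =>
    intro fuel acc hle
    cases fuel with
    | zero => simp at hle
    | succ f =>
      simp only [PySem.Chars.count.go, List.isPrefixOf]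
      by_cases hc : c = h
      · subst hc
        simp [ih f (acc + 1) (by simpa using hle)]
        omega
      · simp [hc, Ne.symm hc, ih f acc (by simpa using hle)]

theorem pv_count_single (s : List Char) (c : Char) :
    PySem.Chars.count s [c] = s.count c := by
  simp [PySem.Chars.count, pv_go_single c s s.length 0 le_rfl]

-- A's folded accumulator equals acc plus the five signed character counts.
theorem pv_fold_eq (l : List Char) : ∀ (acc : Int),
    l.foldl (fun charge char =>
      if char == 'K' then charge + 1
      else if char == 'R' then charge + 1
      else if char == 'H' then charge + 1
      else if char == 'D' then charge - 1
      else if char == 'E' then charge - 1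
      else charge) acc
    = acc + (l.count 'K' : Int) + (l.count 'R' : Int) + (l.count 'H' : Int)
        - (l.count 'D' : Int) - (l.count 'E' : Int) := by
  induction l with
  | nil => intro acc; simp
  | cons h t ih =>
    intro acc
    simp only [List.foldl_cons, List.count_cons, ih]
    by_cases h1 : h = 'K' <;> by_cases h2 : h = 'R' <;> by_cases h3 : h = 'H'
      <;> by_cases h4 : h = 'D' <;> by_cases h5 : h = 'E'
      <;> simp_all <;> ring

-- ===== VERDICT (by name: the statement is the Claim_ definition above) =====
theorem get_seq_charge_spec : Claim_equal_get_seq_charge := by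
  intro seq _
  unfold Spec_get_seq_charge get_seq_charge get_seq_charge_alt
  simp only [PySem.Str.count_eq, show ("K" : String).toList = ['K'] from rfl,
    show ("R" : String).toList = ['R'] from rfl, show ("H" : String).toList = ['H'] from rfl,
    show ("D" : String).toList = ['D'] from rfl, show ("E" : String).toList = ['E'] from rfl,
    pv_count_single]
  rw [pv_fold_eq seq.toList 0]
  ring
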